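-- pv_equiv track=rewrite | github.com/azulejo1237/Match3-Pygame-311 | funciones.py | validar_combinaciones
-- ===== SOURCE A (Python) =====
-- def validar_combinaciones(matriz:list[list]):
--     coincidencias = 0
--     for i in range(len(matriz)):
--         for j in range(len(matriz[i])):
--             # horizontal
--             if j + 2 < len(matriz[i]):
--                 c1 = matriz[i][j]["color"]
--                 c2 = matriz[i][j+1]["color"]
--                 c3 = matriz[i][j+2]["color"]
--                 if c1 == c2 == c3:
--                     coincidencias += 1
--             # vertical
--             if i + 2 < len(matriz):
--                 c1 = matriz[i][j]["color"]
--                 c2 = matriz[i+1][j]["color"]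
--                 c3 = matriz[i+2][j]["color"]
--                 if c1 == c2 == c3:
--                     coincidencias += 1
--     return coincidencias
-- ===== SOURCE B (Python) =====
-- def _scan(values):
--     # values: iterable of (present, color) pairs; counts, via run lengths,
--     # every window of 3 consecutive present cells with equal colors.
--     run = 0
--     prev = None
--     total = 0
--     for present, v in values:
--         if not present:
--             run = 0
--         elif run > 0 and v == prev:
--             run += 1
--         else:
--             run = 1
--         prev = v
--         if run >= 3:
--             total += 1
--     return total
--
--
-- def validar_combinaciones(matriz):
--     total = 0
--     for fila in matriz:
--         total += _scan((True, celda.get("color")) for celda in fila)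
--     ancho = max(map(len, matriz), default=0)
--     for j in range(ancho):
--         total += _scan(
--             (j < len(fila), fila[j].get("color") if j < len(fila) else None)
--             for fila in matriz
--         )
--     return total
-- ===== Notes on version B (the rewrite author's own statement) =====
-- stated objective: alternative
-- what changed: Replaces A's per-cell three-window probes (6 dict lookups per cell) by a single run-length scan along each row and each column that counts max-windows incrementally, with one lookup per cell per direction.
import Mathlib
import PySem

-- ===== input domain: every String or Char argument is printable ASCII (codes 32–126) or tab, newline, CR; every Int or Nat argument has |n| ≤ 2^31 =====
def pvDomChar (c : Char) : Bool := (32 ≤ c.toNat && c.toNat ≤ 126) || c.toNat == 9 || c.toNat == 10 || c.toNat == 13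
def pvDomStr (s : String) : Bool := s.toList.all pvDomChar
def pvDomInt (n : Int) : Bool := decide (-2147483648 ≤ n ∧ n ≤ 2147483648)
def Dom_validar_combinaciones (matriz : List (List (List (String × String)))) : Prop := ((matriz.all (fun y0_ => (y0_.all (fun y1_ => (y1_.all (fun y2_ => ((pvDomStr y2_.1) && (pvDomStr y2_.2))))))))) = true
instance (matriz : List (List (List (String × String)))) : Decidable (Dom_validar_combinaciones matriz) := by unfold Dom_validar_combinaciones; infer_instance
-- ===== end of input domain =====

-- B replaces A's per-cell three-window probes by one run-length scan per row and per column (same O(R·C) cost, fewer lookups); equivalence is claimed on the inputs where A's Python returns (Pre_ excludes exactly its KeyError/IndexError inputs).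

-- ===== PORT A =====
-- shared accessor: celda["color"] as first-match association-list lookup (none = KeyError, excluded by Pre_)
def pvColor (celda : List (String × String)) : Option String := (PySem.Dict.mk celda).get? "color"

def validar_combinaciones (matriz : List (List (List (String × String)))) : Int :=
  (List.range matriz.length).foldl (fun acc i =>
    let fila := matriz.getD i []
    (List.range fila.length).foldl (fun acc j =>
      let acc :=
        if j + 2 < fila.length then
          (if pvColor (fila.getD j []) = pvColor (fila.getD (j+1) []) ∧
              pvColor (fila.getD (j+1) []) = pvColor (fila.getD (j+2) []) then acc + 1 else acc)
        else acc
      if i + 2 < matriz.length then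
        (if pvColor (fila.getD j []) = pvColor ((matriz.getD (i+1) []).getD j []) ∧
            pvColor ((matriz.getD (i+1) []).getD j []) = pvColor ((matriz.getD (i+2) []).getD j []) then acc + 1 else acc)
      else acc) acc) 0

-- ===== PORT B =====
-- one step of Source B's _scan: element none = absent cell (breaks the run), some v = present cell of color v
def pvStep {α : Type} [DecidableEq α] (st : Option α × Nat × Int) (x : Option α) : Option α × Nat × Int :=
  let run' : Nat :=
    match x with
    | none => 0
    | some v => if 0 < st.2.1 ∧ st.1 = some v then st.2.1 + 1 else 1
  (x, run', if 3 ≤ run' then st.2.2 + 1 else st.2.2)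

def pvScan {α : Type} [DecidableEq α] (xs : List (Option α)) : Int :=
  (xs.foldl pvStep (none, 0, 0)).2.2

def validar_combinaciones_alt (matriz : List (List (List (String × String)))) : Int :=
  let horiz := matriz.foldl (fun t fila => t + pvScan (fila.map (fun c => some (pvColor c)))) 0
  let ancho := (matriz.map List.length).foldl max 0
  (List.range ancho).foldl (fun t j =>
    t + pvScan (matriz.map (fun fila =>
      if j < fila.length then some (pvColor (fila.getD j [])) else none))) horiz

-- ===== PRECONDITION & SPEC =====
-- Pre_ holds exactly when A's Python returns: every horizontally probed cell has a "color" key, and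
-- for every vertical probe the two rows below are long enough and the three probed cells have a "color" key.
-- the three cells probed by the horizontal check at (row, j) all carry a "color" key
def pvOkH (fila : List (List (String × String))) (j : Nat) : Bool :=
  (pvColor (fila.getD j [])).isSome && (pvColor (fila.getD (j+1) [])).isSome &&
  (pvColor (fila.getD (j+2) [])).isSome

-- the vertical check at (i, j) finds rows i+1, i+2 long enough and a "color" key in the three probed cells
def pvOkV (matriz : List (List (List (String × String)))) (i j : Nat) : Bool :=
  decide (j < (matriz.getD (i+1) []).length) && decide (j < (matriz.getD (i+2) []).length) &&
  (pvColor ((matriz.getD i []).getD j [])).isSome &&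
  (pvColor ((matriz.getD (i+1) []).getD j [])).isSome &&
  (pvColor ((matriz.getD (i+2) []).getD j [])).isSome

def Pre_validar_combinaciones (matriz : List (List (List (String × String)))) : Prop :=
  ∀ i < matriz.length, ∀ j < (matriz.getD i []).length,
    (j + 2 < (matriz.getD i []).length → pvOkH (matriz.getD i []) j = true) ∧
    (i + 2 < matriz.length → pvOkV matriz i j = true)
instance (matriz : List (List (List (String × String)))) : Decidable (Pre_validar_combinaciones matriz) := by
  unfold Pre_validar_combinaciones; infer_instance

def pvWitness_validar_combinaciones : (List (List (List (String × String)))) :=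
  [[[("color", "r")], [("color", "r")], [("color", "g")]]]

def Spec_validar_combinaciones (matriz : List (List (List (String × String)))) (out : Int) : Prop := out = validar_combinaciones_alt matriz
instance (matriz : List (List (List (String × String)))) (out : Int) : Decidable (Spec_validar_combinaciones matriz out) := by unfold Spec_validar_combinaciones; infer_instance

-- ===== CLAIM (what is proved, stated in full; the proofs are below) =====
def Claim_equal_validar_combinaciones : Prop := ∀ (matriz : List (List (List (String × String)))), Dom_validar_combinaciones matriz → Pre_validar_combinaciones matriz → Spec_validar_combinaciones matriz (validar_combinaciones matriz)

-- ===== LEMMAS AND PROOFS =====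

-- window indicator: 1 iff positions j, j+1, j+2 are all present (some) and equal
def pvTEq {α : Type} [DecidableEq α] (x y z : Option α) : Int :=
  match x, y, z with
  | some a, some b, some c => if a = b ∧ b = c then 1 else 0
  | _, _, _ => 0

def pvStartInd {α : Type} [DecidableEq α] (xs : List (Option α)) (j : Nat) : Int :=
  if j + 2 < xs.length then pvTEq (xs.getD j none) (xs.getD (j+1) none) (xs.getD (j+2) none) else 0

-- total window count, structurally
def pvWc {α : Type} [DecidableEq α] : List (Option α) → Int
  | x :: y :: z :: rest => pvTEq x y z + pvWc (y :: z :: rest)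
  | _ => 0

-- scanner remainder: what pvScan adds when started from state (prev, run)
def pvD {α : Type} [DecidableEq α] (prev : Option α) (run : Nat) : List (Option α) → Int
  | [] => 0
  | x :: xs =>
    let run' : Nat :=
      match x with
      | none => 0
      | some v => if 0 < run ∧ prev = some v then run + 1 else 1
    (if 3 ≤ run' then 1 else 0) + pvD x run' xs

-- boundary (straddling-window) credit of a scanner state
def pvM1 {α : Type} [DecidableEq α] (xs : List (Option α)) (prev : Option α) : Bool :=
  match xs with
  | x :: _ => x.isSome && prev == x
  | [] => false
def pvM2 {α : Type} [DecidableEq α] (xs : List (Option α)) : Bool :=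
  match xs with
  | x :: y :: _ => y.isSome && x == y
  | _ => false
def pvS {α : Type} [DecidableEq α] (xs : List (Option α)) (prev : Option α) (run : Nat) : Int :=
  (if 2 ≤ run ∧ pvM1 xs prev = true then 1 else 0) +
  (if 1 ≤ run ∧ pvM1 xs prev = true ∧ pvM2 xs = true then 1 else 0)

theorem pvScan_foldl {α : Type} [DecidableEq α] (xs : List (Option α)) :
    ∀ (prev : Option α) (run : Nat) (total : Int),
      (xs.foldl pvStep (prev, run, total)).2.2 = total + pvD prev run xs := by
  induction xs with
  | nil => intro prev run total; simp [pvD]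
  | cons x rest ih =>
    intro prev run total
    simp only [List.foldl_cons, pvD, pvStep, ih]
    cases x <;> simp only [] <;> split_ifs <;> ring

theorem pvStartInd_shift {α : Type} [DecidableEq α] (a : Option α) (t : List (Option α)) (j : Nat) :
    pvStartInd (a :: t) (j + 1) = pvStartInd t j := by
  simp only [pvStartInd, List.length_cons, List.getD_cons_succ]
  simp only [show (j + 1 + 2 < t.length + 1) = (j + 2 < t.length) from propext (by omega)]

theorem pvWc_cons {α : Type} [DecidableEq α] (a : Option α) (t : List (Option α)) :
    pvWc (a :: t) = pvStartInd (a :: t) 0 + pvWc t := by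
  match t with
  | [] => simp [pvWc, pvStartInd]
  | [y] => simp [pvWc, pvStartInd]
  | y :: z :: r =>
    simp only [pvWc, pvStartInd]
    simp
    try ring

theorem pvTEq_none_left {α : Type} [DecidableEq α] (y z : Option α) : pvTEq none y z = 0 := by
  cases y <;> cases z <;> rfl

set_option maxRecDepth 8192 in
theorem pvD_eq {α : Type} [DecidableEq α] (xs : List (Option α)) :
    ∀ (prev : Option α) (run : Nat), pvD prev run xs = pvWc xs + pvS xs prev run := by
  induction xs with
  | nil => intro prev run; simp [pvD, pvWc, pvS, pvM1]
  | cons x rest ih =>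
    intro prev run
    have hstep : pvD prev run (x :: rest) =
        (if 3 ≤ (match x with
                 | none => 0
                 | some v => if 0 < run ∧ prev = some v then run + 1 else 1 : Nat) then (1:Int) else 0)
        + pvD x (match x with
                 | none => 0
                 | some v => if 0 < run ∧ prev = some v then run + 1 else 1) rest := rfl
    rw [hstep, ih, pvWc_cons]
    clear ih hstep
    generalize pvWc rest = W
    cases x with
    | none =>
      simp [pvS, pvM1, pvStartInd, pvTEq_none_left]
    | some v =>
      by_cases hp : 0 < run ∧ prev = some v
      · obtain ⟨hrun, rfl⟩ := hp
        rcases rest with _ | ⟨y, rest2⟩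
        · simp [pvS, pvM1, pvM2, pvStartInd, pvTEq, hrun]
          (try split_ifs) <;> omega
        · cases y with
          | none =>
            simp [pvS, pvM1, pvM2, pvStartInd, pvTEq, hrun]
            (try split_ifs) <;> omega
          | some b =>
            rcases rest2 with _ | ⟨z, r⟩
            · rcases eq_or_ne v b with rfl | hb
              · simp [pvS, pvM1, pvM2, pvStartInd, pvTEq, hrun]
                (try split_ifs) <;> omega
              · simp [pvS, pvM1, pvM2, pvStartInd, pvTEq, hrun, hb]
                (try split_ifs) <;> omega
            · cases z with
              | none =>
                rcases eq_or_ne v b with rfl | hb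
                · simp [pvS, pvM1, pvM2, pvStartInd, pvTEq, hrun]
                  (try split_ifs) <;> omega
                · simp [pvS, pvM1, pvM2, pvStartInd, pvTEq, hrun, hb]
                  (try split_ifs) <;> omega
              | some c =>
                rcases eq_or_ne v b with rfl | hb
                · rcases eq_or_ne v c with rfl | hc
                  · simp [pvS, pvM1, pvM2, pvStartInd, pvTEq, hrun]
                    (try split_ifs) <;> omega
                  · simp [pvS, pvM1, pvM2, pvStartInd, pvTEq, hrun, hc]
                    (try split_ifs) <;> omega
                · rcases eq_or_ne b c with rfl | hc
                  · simp [pvS, pvM1, pvM2, pvStartInd, pvTEq, hrun, hb]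
                    (try split_ifs) <;> omega
                  · simp [pvS, pvM1, pvM2, pvStartInd, pvTEq, hrun, hb, hc]
                    (try split_ifs) <;> omega
      · have hrun : ¬(0 < run ∧ prev = some v) := hp
        rcases rest with _ | ⟨y, rest2⟩
        · simp [pvS, pvM1, pvM2, pvStartInd, pvTEq, hrun]
          (try split_ifs) <;>
            first
            | omega
            | (exact absurd ⟨by omega, (‹_ ∧ _›).2⟩ hrun)
            | (intro h1 h2; exact hrun ⟨by omega, h2⟩)
        · cases y with
          | none =>
            simp [pvS, pvM1, pvM2, pvStartInd, pvTEq, hrun]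
            (try split_ifs) <;>
              first
              | omega
              | (exact absurd ⟨by omega, (‹_ ∧ _›).2⟩ hrun)
              | (intro h1 h2; exact hrun ⟨by omega, h2⟩)
          | some b =>
            rcases rest2 with _ | ⟨z, r⟩
            · rcases eq_or_ne v b with rfl | hb
              · simp [pvS, pvM1, pvM2, pvStartInd, pvTEq, hrun]
                (try split_ifs) <;>
                  first
                  | omega
                  | (exact absurd ⟨by omega, (‹_ ∧ _›).2⟩ hrun)
                  | (intro h1 h2; exact hrun ⟨by omega, h2⟩)
                  | (intro h1 h2 h3; exact hrun ⟨by omega, h2⟩)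
              · simp [pvS, pvM1, pvM2, pvStartInd, pvTEq, hrun, hb]
                (try split_ifs) <;>
                  first
                  | omega
                  | (exact absurd ⟨by omega, (‹_ ∧ _›).2⟩ hrun)
                  | (intro h1 h2; exact hrun ⟨by omega, h2⟩)
                  | (intro h1 h2 h3; exact hrun ⟨by omega, h2⟩)
            · cases z with
              | none =>
                rcases eq_or_ne v b with rfl | hb
                · simp [pvS, pvM1, pvM2, pvStartInd, pvTEq, hrun]
                  (try split_ifs) <;>
                  first
                  | omega
                  | (exact absurd ⟨by omega, (‹_ ∧ _›).2⟩ hrun)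
                  | (intro h1 h2; exact hrun ⟨by omega, h2⟩)
                  | (intro h1 h2 h3; exact hrun ⟨by omega, h2⟩)
                · simp [pvS, pvM1, pvM2, pvStartInd, pvTEq, hrun, hb]
                  (try split_ifs) <;>
                  first
                  | omega
                  | (exact absurd ⟨by omega, (‹_ ∧ _›).2⟩ hrun)
                  | (intro h1 h2; exact hrun ⟨by omega, h2⟩)
                  | (intro h1 h2 h3; exact hrun ⟨by omega, h2⟩)
              | some c =>
                rcases eq_or_ne v b with rfl | hb
                · rcases eq_or_ne v c with rfl | hc
                  · simp [pvS, pvM1, pvM2, pvStartInd, pvTEq, hrun]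
                    (try split_ifs) <;>
                  first
                  | omega
                  | (exact absurd ⟨by omega, (‹_ ∧ _›).2⟩ hrun)
                  | (intro h1 h2; exact hrun ⟨by omega, h2⟩)
                  | (intro h1 h2 h3; exact hrun ⟨by omega, h2⟩)
                  · simp [pvS, pvM1, pvM2, pvStartInd, pvTEq, hrun, hc]
                    (try split_ifs) <;>
                  first
                  | omega
                  | (exact absurd ⟨by omega, (‹_ ∧ _›).2⟩ hrun)
                  | (intro h1 h2; exact hrun ⟨by omega, h2⟩)
                  | (intro h1 h2 h3; exact hrun ⟨by omega, h2⟩)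
                · rcases eq_or_ne b c with rfl | hc
                  · simp [pvS, pvM1, pvM2, pvStartInd, pvTEq, hrun, hb]
                    (try split_ifs) <;>
                  first
                  | omega
                  | (exact absurd ⟨by omega, (‹_ ∧ _›).2⟩ hrun)
                  | (intro h1 h2; exact hrun ⟨by omega, h2⟩)
                  | (intro h1 h2 h3; exact hrun ⟨by omega, h2⟩)
                  · simp [pvS, pvM1, pvM2, pvStartInd, pvTEq, hrun, hb, hc]
                    (try split_ifs) <;>
                  first
                  | omega
                  | (exact absurd ⟨by omega, (‹_ ∧ _›).2⟩ hrun)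
                  | (intro h1 h2; exact hrun ⟨by omega, h2⟩)
                  | (intro h1 h2 h3; exact hrun ⟨by omega, h2⟩)

theorem pvScan_eq_wc {α : Type} [DecidableEq α] (xs : List (Option α)) : pvScan xs = pvWc xs := by
  have h := pvScan_foldl xs none 0 0
  rw [pvScan, h, pvD_eq]
  simp [pvS]

theorem pvSum_startInd {α : Type} [DecidableEq α] (xs : List (Option α)) :
    ∑ j ∈ Finset.range xs.length, pvStartInd xs j = pvWc xs := by
  induction xs with
  | nil => simp [pvWc]
  | cons a t ih =>
    rw [List.length_cons, Finset.sum_range_succ']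
    simp only [pvStartInd_shift, ih, pvWc_cons]
    ring

theorem pvFoldl_eq_sum (n : Nat) (F : Int → Nat → Int) (f : Nat → Int)
    (h : ∀ acc j, F acc j = acc + f j) : ∀ a : Int,
    (List.range n).foldl F a = a + ∑ j ∈ Finset.range n, f j := by
  induction n with
  | zero => intro a; simp
  | succ m ih =>
    intro a
    rw [List.range_succ, List.foldl_append, ih, Finset.sum_range_succ]
    simp [h]
    ring

theorem pvMap_sum_eq {β : Type} (l : List β) (d : β) (g : β → Int) :
    (l.map g).sum = ∑ i ∈ Finset.range l.length, g (l.getD i d) := by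
  induction l with
  | nil => simp
  | cons a t ih => rw [List.map_cons, List.sum_cons, List.length_cons, Finset.sum_range_succ', ih]; simp; ring


-- per-cell indicators of A's two checks
def pvH (fila : List (List (String × String))) (j : Nat) : Int :=
  if j + 2 < fila.length ∧ pvColor (fila.getD j []) = pvColor (fila.getD (j+1) []) ∧
      pvColor (fila.getD (j+1) []) = pvColor (fila.getD (j+2) []) then 1 else 0

def pvV (matriz : List (List (List (String × String)))) (i j : Nat) : Int :=
  if i + 2 < matriz.length ∧
      pvColor ((matriz.getD i []).getD j []) = pvColor ((matriz.getD (i+1) []).getD j []) ∧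
      pvColor ((matriz.getD (i+1) []).getD j []) = pvColor ((matriz.getD (i+2) []).getD j []) then 1 else 0

def pvVE (matriz : List (List (List (String × String)))) (i j : Nat) : Int :=
  if j < (matriz.getD i []).length then pvV matriz i j else 0

def pvRowOpt (fila : List (List (String × String))) : List (Option (Option String)) :=
  fila.map (fun c => some (pvColor c))

def pvCol (matriz : List (List (List (String × String)))) (j : Nat) : List (Option (Option String)) :=
  matriz.map (fun fila => if j < fila.length then some (pvColor (fila.getD j [])) else none)

theorem pvIf_flat (c d : Prop) [Decidable c] [Decidable d] (a : Int) :
    (if c then (if d then a + 1 else a) else a) = a + (if c ∧ d then 1 else 0) := by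
  split_ifs <;> first | ring1 | tauto

theorem pvA_eq_sum (matriz : List (List (List (String × String)))) :
    validar_combinaciones matriz
      = ∑ i ∈ Finset.range matriz.length,
          ∑ j ∈ Finset.range (matriz.getD i []).length,
            (pvH (matriz.getD i []) j + pvV matriz i j) := by
  unfold validar_combinaciones
  rw [pvFoldl_eq_sum _ _
        (fun i => ∑ j ∈ Finset.range (matriz.getD i []).length,
          (pvH (matriz.getD i []) j + pvV matriz i j)) ?_ 0]
  · ring
  · intro acc i
    show (List.range (matriz.getD i []).length).foldl _ acc = _
    rw [pvFoldl_eq_sum _ _ (fun j => pvH (matriz.getD i []) j + pvV matriz i j) ?_ acc]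
    intro acc2 j
    simp only [pvIf_flat, pvH, pvV]
    ring

theorem pvRowOpt_getD (fila : List (List (String × String))) (k : Nat) (hk : k < fila.length) :
    (pvRowOpt fila).getD k none = some (pvColor (fila.getD k [])) := by
  simp [pvRowOpt, List.getD_eq_getElem?_getD, List.getElem?_eq_getElem hk]

theorem pvCol_getD (matriz : List (List (List (String × String)))) (j i : Nat)
    (hi : i < matriz.length) :
    (pvCol matriz j).getD i none =
      if j < (matriz.getD i []).length then some (pvColor ((matriz.getD i []).getD j [])) else none := by
  simp [pvCol, List.getD_eq_getElem?_getD, List.getElem?_eq_getElem hi]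

theorem pvRow_sum (fila : List (List (String × String))) :
    ∑ j ∈ Finset.range fila.length, pvH fila j = pvScan (pvRowOpt fila) := by
  rw [pvScan_eq_wc, ← pvSum_startInd]
  have hl : (pvRowOpt fila).length = fila.length := by simp [pvRowOpt]
  rw [hl]
  refine Finset.sum_congr rfl ?_
  intro j hj
  rw [Finset.mem_range] at hj
  by_cases hg : j + 2 < fila.length
  · have h0 := pvRowOpt_getD fila j (by omega)
    have h1 := pvRowOpt_getD fila (j+1) (by omega)
    have h2 := pvRowOpt_getD fila (j+2) (by omega)
    simp only [pvH, pvStartInd, hl, hg, true_and, if_true, h0, h1, h2, pvTEq]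
    all_goals try split_ifs
    all_goals first | rfl | tauto
  · have hnc : ¬(j + 2 < fila.length ∧
        pvColor (fila.getD j []) = pvColor (fila.getD (j+1) []) ∧
        pvColor (fila.getD (j+1) []) = pvColor (fila.getD (j+2) [])) := fun hcon => hg hcon.1
    simp only [pvH, pvStartInd, hl]
    rw [if_neg hnc, if_neg hg]

theorem pvColSum (matriz : List (List (List (String × String))))
    (hpre : Pre_validar_combinaciones matriz) (j : Nat) :
    ∑ i ∈ Finset.range matriz.length, pvVE matriz i j = pvScan (pvCol matriz j) := by
  rw [pvScan_eq_wc, ← pvSum_startInd]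
  have hl : (pvCol matriz j).length = matriz.length := by simp [pvCol]
  rw [hl]
  refine Finset.sum_congr rfl ?_
  intro i hi
  rw [Finset.mem_range] at hi
  by_cases h2 : i + 2 < matriz.length
  · by_cases hj : j < (matriz.getD i []).length
    · have hv := (hpre i (by omega) j hj).2 h2
      simp only [pvOkV, Bool.and_eq_true, decide_eq_true_eq] at hv
      have e0 := pvCol_getD matriz j i (by omega)
      have e1 := pvCol_getD matriz j (i+1) (by omega)
      have e2 := pvCol_getD matriz j (i+2) (by omega)
      rw [if_pos hj] at e0
      rw [if_pos hv.1.1.1.1] at e1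
      rw [if_pos hv.1.1.1.2] at e2
      rw [show pvVE matriz i j = pvV matriz i j from if_pos hj]
      simp only [pvV, pvStartInd, hl, h2, true_and, if_true, e0, e1, e2, pvTEq]
    · have e0 := pvCol_getD matriz j i (by omega)
      rw [if_neg hj] at e0
      rw [show pvVE matriz i j = 0 from if_neg hj]
      simp only [pvStartInd, hl, e0, pvTEq_none_left]
      all_goals try split_ifs
      all_goals rfl
  · have hz : pvV matriz i j = 0 := by
      simp only [pvV]
      rw [if_neg]
      intro hcon
      exact h2 hcon.1
    simp only [pvVE, pvStartInd, hl, hz]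
    all_goals try split_ifs
    all_goals rfl

theorem pvLen_le_ancho (matriz : List (List (List (String × String)))) (i : Nat)
    (hi : i < matriz.length) :
    (matriz.getD i []).length ≤ (matriz.map List.length).foldl max 0 := by
  have hmem : (matriz.getD i []).length ∈ matriz.map List.length := by
    rw [List.getD_eq_getElem?_getD, List.getElem?_eq_getElem hi]
    exact List.mem_map_of_mem (List.getElem_mem _)
  exact (PySem.List.le_foldl_max _ _).2 _ hmem

theorem pvVert_sum (matriz : List (List (List (String × String))))
    (hpre : Pre_validar_combinaciones matriz) :
    ∑ i ∈ Finset.range matriz.length, ∑ j ∈ Finset.range (matriz.getD i []).length, pvV matriz i j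
      = ∑ j ∈ Finset.range ((matriz.map List.length).foldl max 0), pvScan (pvCol matriz j) := by
  have h1 : ∀ i ∈ Finset.range matriz.length,
      ∑ j ∈ Finset.range (matriz.getD i []).length, pvV matriz i j
        = ∑ j ∈ Finset.range ((matriz.map List.length).foldl max 0), pvVE matriz i j := by
    intro i hi
    rw [Finset.mem_range] at hi
    have hin : ∀ j ∈ Finset.range (matriz.getD i []).length, pvV matriz i j = pvVE matriz i j := by
      intro j hj
      rw [Finset.mem_range] at hj
      exact (if_pos hj).symm
    rw [Finset.sum_congr rfl hin]
    have hsub : Finset.range (matriz.getD i []).length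
        ⊆ Finset.range ((matriz.map List.length).foldl max 0) := by
      intro x hx
      rw [Finset.mem_range] at hx ⊢
      exact lt_of_lt_of_le hx (pvLen_le_ancho matriz i hi)
    refine Finset.sum_subset hsub ?_
    intro j _ hj
    rw [Finset.mem_range] at hj
    exact if_neg hj
  rw [Finset.sum_congr rfl h1, Finset.sum_comm]
  exact Finset.sum_congr rfl (fun j _ => pvColSum matriz hpre j)

theorem pvSum_map_range (n : Nat) (f : Nat → Int) :
    ((List.range n).map f).sum = ∑ j ∈ Finset.range n, f j := by
  induction n with
  | zero => simp
  | succ m ih =>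
    rw [List.range_succ, List.map_append, List.sum_append, Finset.sum_range_succ, ih]
    simp

theorem pvB_eq_sum (matriz : List (List (List (String × String)))) :
    validar_combinaciones_alt matriz
      = ∑ i ∈ Finset.range matriz.length, pvScan (pvRowOpt (matriz.getD i []))
        + ∑ j ∈ Finset.range ((matriz.map List.length).foldl max 0), pvScan (pvCol matriz j) := by
  unfold validar_combinaciones_alt
  rw [PySem.List.foldl_add, PySem.List.foldl_add]
  rw [pvSum_map_range, pvMap_sum_eq matriz []]
  simp only [pvRowOpt, pvCol]
  ring

-- ===== VERDICT (by name: the statement is the Claim_ definition above) =====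
theorem validar_combinaciones_spec : Claim_equal_validar_combinaciones := by
  intro matriz _hdom hpre
  unfold Spec_validar_combinaciones
  rw [pvA_eq_sum, pvB_eq_sum]
  have hH : ∀ i ∈ Finset.range matriz.length,
      ∑ j ∈ Finset.range (matriz.getD i []).length, (pvH (matriz.getD i []) j + pvV matriz i j)
        = pvScan (pvRowOpt (matriz.getD i []))
          + ∑ j ∈ Finset.range (matriz.getD i []).length, pvV matriz i j := by
    intro i _
    rw [Finset.sum_add_distrib, pvRow_sum]
  rw [Finset.sum_congr rfl hH, Finset.sum_add_distrib, pvVert_sum matriz hpre]
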